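-- pv_equiv track=rewrite | github.com/RussOrdira/apex | apex_predict/services/ingestion.py | _match_option
-- ===== SOURCE A (Python) =====
-- def _normalize_token(value: str) -> str:
--     return "".join(ch for ch in value.upper() if ch.isalnum())
--
-- def _match_option(options: list[str], candidates: list[str | None]) -> str | None:
--     normalized_to_option = {_normalize_token(option): option for option in options}
--     for candidate in candidates:
--         if not candidate:
--             continue
--         direct = normalized_to_option.get(_normalize_token(candidate))
--         if direct:
--             return direct
--     return None
-- ===== SOURCE B (Python) =====
-- def _normalize_token(value: str) -> str:
--     return "".join(ch for ch in value.upper() if ch.isalnum())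
--
-- def _match_option(options, candidates):
--     # Transposed strategy: one pass over options updating a per-candidate
--     # "last matching option" table, then a final pass over that table.
--     toks = [_normalize_token(c) if c else None for c in candidates]
--     last = [None] * len(candidates)
--     for option in options:
--         t = _normalize_token(option)
--         last = [option if ct == t else m for ct, m in zip(toks, last)]
--     for m in last:
--         if m:
--             return m
--     return None
-- ===== Notes on version B (the rewrite author's own statement) =====
-- stated objective: alternative
-- what changed: Transposed the loops: instead of a precomputed normalized-token dict probed per candidate, B pre-normalizes candidates once, makes a single pass over options updating a per-candidate last-matching-option table, and a final pass returns the first truthy table entry.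
import Mathlib
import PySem

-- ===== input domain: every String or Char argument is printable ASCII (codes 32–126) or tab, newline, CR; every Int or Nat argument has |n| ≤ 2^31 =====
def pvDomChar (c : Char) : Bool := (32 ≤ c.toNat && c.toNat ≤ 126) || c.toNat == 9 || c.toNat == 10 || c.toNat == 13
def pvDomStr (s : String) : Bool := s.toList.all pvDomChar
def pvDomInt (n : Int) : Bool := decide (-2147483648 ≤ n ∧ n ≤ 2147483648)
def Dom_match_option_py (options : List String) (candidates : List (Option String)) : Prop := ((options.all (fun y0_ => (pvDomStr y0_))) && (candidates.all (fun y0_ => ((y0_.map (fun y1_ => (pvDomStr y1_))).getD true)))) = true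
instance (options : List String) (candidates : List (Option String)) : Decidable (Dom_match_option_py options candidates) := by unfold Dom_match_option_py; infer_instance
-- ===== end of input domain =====

-- B transposes A's loops: one pass over options filling a per-candidate last-matching-option
-- table (no dict), then a pass over that table returns the first truthy entry (alternative, not faster).


-- ===== PORT A =====
-- _normalize_token: "".join(ch for ch in value.upper() if ch.isalnum()), kept as List Char
def pvNorm (s : String) : List Char :=
  (PySem.Chars.upper s.toList).filter PySem.Chars.isalnum

-- the 'for candidate in candidates' loop of A, over the precomputed dict
def pvLoopA (d : PySem.Dict (List Char) String) : List (Option String) → Option String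
  | [] => none
  | c :: rest =>
    match c with
    | none => pvLoopA d rest                   -- 'if not candidate: continue'
    | some s =>
      if s = "" then pvLoopA d rest            -- 'if not candidate: continue'
      else
        match d.get? (pvNorm s) with
        | some direct => if direct = "" then pvLoopA d rest else some direct  -- 'if direct: return direct'
        | none => pvLoopA d rest

def match_option_py (options : List String) (candidates : List (Option String)) : Option String :=
  let normalizedToOption : PySem.Dict (List Char) String :=
    options.foldl (fun d o => d.insert (pvNorm o) o) PySem.Dict.empty
  pvLoopA normalizedToOption candidates

-- ===== PORT B =====
-- toks = [_normalize_token(c) if c else None for c in candidates]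
def pvToks (candidates : List (Option String)) : List (Option (List Char)) :=
  candidates.map (fun c =>
    match c with
    | none => none
    | some s => if s = "" then none else some (pvNorm s))

-- last = [option if ct == t else m for ct, m in zip(toks, last)]  (one step of the options loop)
def pvStep (toks : List (Option (List Char))) (last : List (Option String)) (o : String) : List (Option String) :=
  (toks.zip last).map (fun p => if p.1 = some (pvNorm o) then some o else p.2)

-- final pass: 'for m in last: if m: return m'
def pvFirst : List (Option String) → Option String
  | [] => none
  | m :: rest =>
    match m with
    | none => pvFirst rest
    | some s => if s = "" then pvFirst rest else some s

def match_option_py_alt (options : List String) (candidates : List (Option String)) : Option String :=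
  let toks := pvToks candidates
  let last := options.foldl (fun last o => pvStep toks last o) (candidates.map (fun _ => (none : Option String)))
  pvFirst last

-- ===== PRECONDITION & SPEC =====
def Spec_match_option_py (options : List String) (candidates : List (Option String)) (out : Option String) : Prop := out = match_option_py_alt options candidates
instance (options : List String) (candidates : List (Option String)) (out : Option String) : Decidable (Spec_match_option_py options candidates out) := by unfold Spec_match_option_py; infer_instance

-- ===== CLAIM (what is proved, stated in full; the proofs are below) =====
def Claim_equal_match_option_py : Prop := ∀ (options : List String) (candidates : List (Option String)), Dom_match_option_py options candidates → Spec_match_option_py options candidates (match_option_py options candidates)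

-- ===== LEMMAS AND PROOFS =====
-- per-candidate last-wins scan of options (the value A's dict stores at a token)
def pvBest (options : List String) (ct : Option (List Char)) : Option String :=
  options.foldl (fun best o => if ct = some (pvNorm o) then some o else best) none

-- the dict comprehension's lookup at tok IS the last-wins scan of options
theorem pvGet_foldl (options : List String) (tok : List Char)
    (d0 : PySem.Dict (List Char) String) :
    (options.foldl (fun d o => d.insert (pvNorm o) o) d0).get? tok
      = options.foldl (fun best o => if some (pvNorm o) = some tok then some o else best) (d0.get? tok) := by
  induction options generalizing d0 with
  | nil => rfl
  | cons o rest ih =>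
    simp only [List.foldl_cons, ih, PySem.Dict.get?_insert]
    by_cases h : pvNorm o = tok
    · simp [h]
    · simp [h, Ne.symm h]

-- the fold of pvStep decomposes componentwise: head fold :: tail fold
theorem pvFold_cons (opts : List String) (t : Option (List Char)) (ts : List (Option (List Char)))
    (l : Option String) (ls : List (Option String)) :
    opts.foldl (fun last o => pvStep (t :: ts) last o) (l :: ls)
      = (opts.foldl (fun b o => if t = some (pvNorm o) then some o else b) l)
        :: opts.foldl (fun last o => pvStep ts last o) ls := by
  induction opts generalizing l ls with
  | nil => rfl
  | cons o rest ih =>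
    simp only [List.foldl_cons]
    rw [show pvStep (t :: ts) (l :: ls) o
          = (if t = some (pvNorm o) then some o else l) :: pvStep ts ls o from rfl]
    exact ih _ _

-- A's candidate loop equals B's table construction + final pass
theorem pvLoop_eq_table (options : List String) (candidates : List (Option String)) :
    pvLoopA (options.foldl (fun d o => d.insert (pvNorm o) o) PySem.Dict.empty) candidates
      = pvFirst (options.foldl (fun last o => pvStep (pvToks candidates) last o)
          (candidates.map (fun _ => (none : Option String)))) := by
  induction candidates with
  | nil =>
    have h : ∀ op : List String,
        op.foldl (fun last o => pvStep ([] : List (Option (List Char))) last o) ([] : List (Option String)) = [] := by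
      intro op; induction op with
      | nil => rfl
      | cons o rest ih => simpa [pvStep] using ih
    simp [pvLoopA, pvToks, pvFirst, h]
  | cons c rest ih =>
    have hcons : pvToks (c :: rest) =
        (match c with
         | none => none
         | some s => if s = "" then none else some (pvNorm s)) :: pvToks rest := rfl
    rw [show ((c :: rest).map (fun _ => (none : Option String)))
          = (none : Option String) :: rest.map (fun _ => (none : Option String)) from rfl,
        hcons, pvFold_cons]
    match c with
    | none =>
      simp [pvLoopA, pvFirst, ih]
    | some s =>
      by_cases hs : s = ""
      · simp [pvLoopA, hs, pvFirst, ih]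
      · simp only [pvLoopA, if_neg hs]
        rw [pvGet_foldl]
        have hget : (PySem.Dict.empty : PySem.Dict (List Char) String).get? (pvNorm s) = none :=
          PySem.Dict.get?_empty _
        rw [hget]
        have hcond : (options.foldl (fun best o => if some (pvNorm o) = some (pvNorm s) then some o else best)
              (none : Option String))
            = options.foldl (fun b o => if some (pvNorm s) = some (pvNorm o) then some o else b)
              (none : Option String) := by
          apply PySem.List.foldl_congr_mem
          intro b o _; simp [eq_comm]
        rw [hcond]

        cases hb : options.foldl (fun b o => if some (pvNorm s) = some (pvNorm o) then some o else b)
            (none : Option String) with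
        | none => simpa [pvFirst] using ih
        | some best =>
          by_cases hbe : best = ""
          · simpa [pvFirst, hbe] using ih
          · simp [pvFirst, hbe]

-- ===== VERDICT (by name: the statement is the Claim_ definition above) =====
theorem match_option_py_spec : Claim_equal_match_option_py := by
  intro options candidates _
  unfold Spec_match_option_py match_option_py match_option_py_alt
  exact pvLoop_eq_table options candidates
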